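-- pv_equiv track=rewrite | github.com/carlosfernandezcabrero/CodeSignal-solutions | Weak Numbers/main.py | solution
-- ===== SOURCE A (Python) =====
-- def solution(n):
--
--     def get_weakness(n):
--         return len([_i for _i in range(1, n + 1) if n % _i == 0])
--
--     max_weakness = 0
--     num_max_weakness = 0
--
--     weaknesses = {}
--     for i in range(1, n + 1):
--         weaknesses[i] = get_weakness(i)
--
--     for i in range(n, 0, -1):
--         if i - 1 < max_weakness:
--             break
--
--         weakness = weaknesses[i]
--         weakness_count = 0
--
--         for k, v in weaknesses.items():
--             if k < i and v > weakness:
--                 weakness_count += 1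
--
--         if weakness_count > max_weakness:
--             max_weakness = weakness_count
--             num_max_weakness = 1
--         elif weakness_count == max_weakness:
--             num_max_weakness += 1
--
--     return [max_weakness, num_max_weakness]
-- ===== SOURCE B (Python) =====
-- def solution(n):
--     if n <= 0:
--         return [0, 0]
--     # divisor counts by sieve: d[j] = number of divisors of j
--     d = [0] * (n + 1)
--     for i in range(1, n + 1):
--         for j in range(i, n + 1, i):
--             d[j] += 1
--     # largest divisor count seen anywhere
--     top = 0
--     for v in d:
--         if v > top:
--             top = v
--     # one ascending pass: cbyd[c] = how many earlier numbers have divisor count c;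
--     # weakness of i = number of earlier numbers with a larger divisor count
--     cbyd = [0] * (top + 2)
--     best = -1
--     cnt = 0
--     for i in range(1, n + 1):
--         f = sum(cbyd[d[i] + 1:])
--         if f > best:
--             best = f
--             cnt = 1
--         elif f == best:
--             cnt += 1
--         cbyd[d[i]] += 1
--     return [best, cnt]
-- ===== Notes on version B (the rewrite author's own statement) =====
-- stated objective: faster
-- what changed: B replaces A's per-number trial-division divisor counts and quadratic backward scan over the dict by a divisor-count sieve plus one ascending pass that keeps a count-per-divisor-count table, so each weakness is a suffix sum of that small table instead of an inner scan over all n numbers.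
import Mathlib
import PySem

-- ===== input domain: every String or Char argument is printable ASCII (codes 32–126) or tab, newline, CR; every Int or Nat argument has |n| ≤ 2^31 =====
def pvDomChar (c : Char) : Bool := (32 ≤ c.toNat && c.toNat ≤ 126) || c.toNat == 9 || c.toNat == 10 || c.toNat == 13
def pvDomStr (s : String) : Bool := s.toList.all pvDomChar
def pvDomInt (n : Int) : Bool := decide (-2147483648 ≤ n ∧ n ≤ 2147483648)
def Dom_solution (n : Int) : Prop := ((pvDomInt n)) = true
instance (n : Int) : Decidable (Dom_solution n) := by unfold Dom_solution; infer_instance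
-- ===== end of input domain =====

-- B replaces A's trial-division divisor counts and quadratic backward dict scan by a divisor
-- sieve plus one ascending pass over a count-per-divisor-count table (objective: faster).

-- ===== PORT A =====
-- get_weakness(i): len([_i for _i in range(1, i + 1) if i % _i == 0])
def pvGw (i : Int) : Int :=
  ((PySem.List.pyRange 1 (i + 1) 1).filter (fun j => PySem.Int.mod i j == 0)).length

-- the inner 'for k, v in weaknesses.items(): if k < i and v > weakness: weakness_count += 1'
def pvWcount (ws : PySem.Dict Int Int) (i weakness : Int) : Int :=
  ws.items.foldl (fun acc kv => if kv.1 < i ∧ weakness < kv.2 then acc + 1 else acc) 0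

-- 'weaknesses = {}; for i in range(1, n + 1): weaknesses[i] = get_weakness(i)'
def pvWs (n : Int) : PySem.Dict Int Int :=
  (PySem.List.pyRange 1 (n + 1) 1).foldl (fun d i => d.insert i (pvGw i)) PySem.Dict.empty

-- 'for i in range(n, 0, -1): …' with the break; 'weaknesses[i]' is read with getD — the key
-- is always present for every i this loop visits (the dict holds keys 1..n), so no KeyError.
def pvLoopA (ws : PySem.Dict Int Int) : List Int → Int → Int → Int × Int
  | [], m, c => (m, c)
  | i :: rest, m, c =>
    if i - 1 < m then (m, c)
    else
      let weakness := ws.getD i 0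
      let wc := pvWcount ws i weakness
      if m < wc then pvLoopA ws rest wc 1
      else if wc = m then pvLoopA ws rest m (c + 1)
      else pvLoopA ws rest m c

def solution (n : Int) : List Int :=
  let ws := pvWs n
  let st := pvLoopA ws (PySem.List.pyRange n 0 (-1)) 0 0
  [st.1, st.2]

-- ===== PORT B =====
-- 'l[j] += 1' (every call site uses a valid nonnegative index j < len(l))
def pvBump (l : List Int) (j : Int) : List Int :=
  l.set j.toNat (PySem.List.pyGetD l j 0 + 1)

-- 'd = [0]*(n+1); for i in range(1, n+1): for j in range(i, n+1, i): d[j] += 1'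
def pvSieve (n : Int) : List Int :=
  (PySem.List.pyRange 1 (n + 1) 1).foldl
    (fun d i => (PySem.List.pyRange i (n + 1) i).foldl (fun d2 j => pvBump d2 j) d)
    (List.replicate (n + 1).toNat 0)

-- one iteration of B's ascending pass; state = (cbyd, (best, cnt))
def pvStepB (d : List Int) (st : List Int × Int × Int) (i : Int) : List Int × Int × Int :=
  let di := PySem.List.pyGetD d i 0
  let f := (PySem.List.slice st.1 (some (di + 1)) none).sum
  let bc := if st.2.1 < f then (f, 1)
            else if f = st.2.1 then (st.2.1, st.2.2 + 1)
            else st.2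
  (pvBump st.1 di, bc)

def solution_alt (n : Int) : List Int :=
  if n ≤ 0 then [0, 0]
  else
    let d := pvSieve n
    let top := d.foldl (fun t v => if t < v then v else t) 0
    let st := (PySem.List.pyRange 1 (n + 1) 1).foldl (pvStepB d)
      (List.replicate (top + 2).toNat 0, (-1, 0))
    [st.2.1, st.2.2]

-- ===== PRECONDITION & SPEC =====
def Spec_solution (n : Int) (out : List Int) : Prop := out = solution_alt n
instance (n : Int) (out : List Int) : Decidable (Spec_solution n out) := by unfold Spec_solution; infer_instance

-- ===== CLAIM (what is proved, stated in full; the proofs are below) =====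
def Claim_equal_solution : Prop := ∀ (n : Int), Dom_solution n → Spec_solution n (solution n)

-- ===== LEMMAS AND PROOFS =====

-- the max/count accumulator step both loops implement
def pvMcStep (st : Int × Int) (x : Int) : Int × Int :=
  if st.1 < x then (x, 1) else if x = st.1 then (st.1, st.2 + 1) else st

-- weakness of i as a pure function: how many k < i have strictly more divisors than i
def pvF (n i : Int) : Int :=
  ((PySem.List.pyRange 1 (n + 1) 1).countP (fun k => decide (k < i ∧ pvGw i < pvGw k)) : Int)

-- the cbyd table after B has processed the numbers in p
def pvC (n : Int) (p : List Int) : List Int :=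
  p.foldl (fun cb k => pvBump cb (PySem.List.pyGetD (pvSieve n) k 0))
    (List.replicate ((pvSieve n).foldl (fun t v => if t < v then v else t) 0 + 2).toNat 0)

-- B's divisor count of k, read from the sieve
def pvDv (n k : Int) : Int := PySem.List.pyGetD (pvSieve n) k 0

lemma pv_mc_eq (l : List Int) : ∀ (m c : Int),
    l.foldl pvMcStep (m, c) =
      (l.foldl max m,
       if l.foldl max m = m then c + (l.count m : Int) else (l.count (l.foldl max m) : Int)) := by
  induction l with
  | nil => intro m c; simp
  | cons x t ih =>
    intro m c
    simp only [List.foldl_cons, pvMcStep]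
    rcases lt_trichotomy m x with h | h | h
    · rw [if_pos h, ih x 1]
      have hmx : max m x = x := by omega
      have hM : t.foldl max x ≠ m := by
        have := (PySem.List.le_foldl_max t x).1; omega
      rw [hmx, if_neg hM]
      by_cases hx : t.foldl max x = x
      · rw [hx, if_pos rfl]
        simp [List.count_cons]
        omega
      · rw [if_neg hx]
        have hbx : (t.foldl max x == x) = false := by simp [hx]
        simp [List.count_cons, hbx]
        omega
    · subst h
      rw [if_neg (lt_irrefl m), if_pos rfl, ih m (c+1)]
      have hmx : max m m = m := by omega
      rw [hmx]
      by_cases hM : t.foldl max m = m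
      · rw [if_pos hM, if_pos hM]
        simp [List.count_cons]
        omega
      · rw [if_neg hM, if_neg hM]
        have hb : (t.foldl max m == m) = false := by simp [hM]
        simp [List.count_cons, hb]
        omega
    · rw [if_neg (by omega), if_neg (by omega), ih m c]
      have hmx : max m x = m := by omega
      rw [hmx]
      by_cases hM : t.foldl max m = m
      · rw [if_pos hM, if_pos hM]
        have hb : (m == x) = false := by simp; omega
        simp [List.count_cons, hb]
        omega
      · rw [if_neg hM, if_neg hM]
        have hMx : t.foldl max m ≠ x := by
          have := (PySem.List.le_foldl_max t m).1; omega
        have hb : (t.foldl max m == x) = false := by simp [hMx]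
        simp [List.count_cons, hb]
        omega

lemma pv_foldl_max_init (t : List Int) : ∀ (a x : Int),
    t.foldl max (max a x) = max (t.foldl max a) x := by
  induction t with
  | nil => intro a x; rfl
  | cons y t ih =>
    intro a x
    simp only [List.foldl_cons]
    rw [show max (max a x) y = max (max a y) x by omega, ih]

lemma pv_foldl_max_reverse (l : List Int) : ∀ (a : Int),
    l.reverse.foldl max a = l.foldl max a := by
  induction l with
  | nil => intro a; rfl
  | cons x t ih =>
    intro a
    simp only [List.reverse_cons, List.foldl_append, List.foldl_cons, List.foldl_nil, ih]
    rw [← pv_foldl_max_init]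

lemma pv_mc_noop (g : Int → Int) : ∀ (l : List Int) (m c : Int), (∀ x ∈ l, g x < m) →
    l.foldl (fun st j => pvMcStep st (g j)) (m, c) = (m, c) := by
  intro l
  induction l with
  | nil => intro m c _; rfl
  | cons x t ih =>
    intro m c h
    simp only [List.foldl_cons]
    have hx := h x (by simp)
    have : pvMcStep (m, c) (g x) = (m, c) := by
      simp only [pvMcStep]
      rw [if_neg (by omega), if_neg (by omega)]
    rw [this, ih m c (fun y hy => h y (by simp [hy]))]

lemma pv_ws_items (n : Int) :
    (pvWs n).items = (PySem.List.pyRange 1 (n + 1) 1).map (fun i => (i, pvGw i)) := by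
  unfold pvWs
  rw [PySem.Dict.items_foldl_insert_fresh (PySem.List.pyRange 1 (n + 1) 1) (fun i => i) pvGw
    PySem.Dict.empty (by simp [PySem.Dict.contains_empty])
    (by simpa using PySem.List.nodup_pyRange_one 1 (n+1))]
  show PySem.Dict.empty.items ++ _ = _
  simp [PySem.Dict.empty, PySem.Dict.items]

lemma pv_ws_nodup (n : Int) : (pvWs n).keys.Nodup := by
  have : (pvWs n).keys = (PySem.List.pyRange 1 (n + 1) 1) := by
    show (pvWs n).items.map (·.1) = _
    rw [pv_ws_items]
    simp [List.map_map, Function.comp_def]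
  rw [this]
  exact PySem.List.nodup_pyRange_one 1 (n+1)

lemma pv_ws_getD (n i : Int) (h : i ∈ PySem.List.pyRange 1 (n + 1) 1) :
    (pvWs n).getD i 0 = pvGw i := by
  refine PySem.Dict.getD_of_mem_items (pvWs n) ?_ (pv_ws_nodup n) 0
  rw [pv_ws_items]
  exact List.mem_map.2 ⟨i, h, rfl⟩

lemma pv_wcount_eq (n i : Int) : pvWcount (pvWs n) i (pvGw i) = pvF n i := by
  unfold pvWcount pvF
  rw [pv_ws_items, List.foldl_map]
  rw [PySem.List.foldl_ite_add_one (fun k => k < i ∧ pvGw i < pvGw k) _ 0]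
  simp

lemma pv_F_le (n i : Int) (h1 : 1 ≤ i) (h2 : i ≤ n) : pvF n i ≤ i - 1 := by
  unfold pvF
  have hmono : ((PySem.List.pyRange 1 (n + 1) 1).countP (fun k => decide (k < i ∧ pvGw i < pvGw k)))
      ≤ ((PySem.List.pyRange 1 (n + 1) 1).countP (fun k => decide (k < i))) := by
    apply List.countP_mono_left
    intro x _ hx
    simp at hx ⊢
    exact hx.1
  have hsplit : ((PySem.List.pyRange 1 (n + 1) 1).countP (fun k => decide (k < i))) = (i - 1).toNat := by
    rw [PySem.List.pyRange_one_append 1 i (n+1) (by omega) (by omega), List.countP_append]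
    have ha : (PySem.List.pyRange 1 i 1).countP (fun k => decide (k < i))
        = (PySem.List.pyRange 1 i 1).length := by
      apply List.countP_eq_length.2
      intro x hx
      have := (PySem.List.mem_pyRange_one).1 hx
      simp; omega
    have hb : (PySem.List.pyRange i (n+1) 1).countP (fun k => decide (k < i)) = 0 := by
      apply List.countP_eq_zero.2
      intro x hx
      have := (PySem.List.mem_pyRange_one).1 hx
      simp; omega
    rw [ha, hb, PySem.List.length_pyRange_one]
    omega
  have := hmono.trans_eq hsplit
  omega

lemma pv_loopA_eq (n : Int) : ∀ (l : List Int) (m c : Int), l.Pairwise (· > ·) →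
    (∀ i ∈ l, i ∈ PySem.List.pyRange 1 (n + 1) 1) →
    pvLoopA (pvWs n) l m c = l.foldl (fun st i => pvMcStep st (pvF n i)) (m, c) := by
  intro l
  induction l with
  | nil => intro m c _ _; rfl
  | cons i rest ih =>
    intro m c hpw hmem
    have hi : i ∈ PySem.List.pyRange 1 (n + 1) 1 := hmem i (by simp)
    have hib := (PySem.List.mem_pyRange_one).1 hi
    have hFle : pvF n i ≤ i - 1 := pv_F_le n i (by omega) (by omega)
    simp only [pvLoopA]
    rw [pv_ws_getD n i hi, pv_wcount_eq n i]
    by_cases hbrk : i - 1 < m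
    · rw [if_pos hbrk]
      have hnoop := pv_mc_noop (pvF n) (i :: rest) m c (by
        intro x hx
        rcases List.mem_cons.1 hx with hx | hx
        · subst hx; omega
        · have hxi : x < i := (List.pairwise_cons.1 hpw).1 x hx
          have hxb := (PySem.List.mem_pyRange_one).1 (hmem x (List.mem_cons_of_mem _ hx))
          have := pv_F_le n x (by omega) (by omega)
          omega)
      rw [hnoop]
    · rw [if_neg hbrk, List.foldl_cons]
      have hrest := (List.pairwise_cons.1 hpw).2
      have hmemr : ∀ x ∈ rest, x ∈ PySem.List.pyRange 1 (n + 1) 1 :=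
        fun x hx => hmem x (List.mem_cons_of_mem _ hx)
      by_cases h1 : m < pvF n i
      · rw [if_pos h1, ih _ _ hrest hmemr]
        congr 1
        simp [pvMcStep, h1]
      · rw [if_neg h1]
        by_cases h2 : pvF n i = m
        · rw [if_pos h2, ih _ _ hrest hmemr]
          congr 1
          simp [pvMcStep, h1, h2]
        · rw [if_neg h2, ih _ _ hrest hmemr]
          congr 1
          simp [pvMcStep, h1, h2]

lemma pv_gw_pos (i : Int) (h : 1 ≤ i) : 1 ≤ pvGw i := by
  unfold pvGw
  have h1 : (1 : Int) ∈ (PySem.List.pyRange 1 (i + 1) 1).filter (fun j => PySem.Int.mod i j == 0) := by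
    rw [List.mem_filter]
    constructor
    · exact (PySem.List.mem_pyRange_one).2 ⟨le_refl 1, by omega⟩
    · simp [PySem.Int.mod_eq_zero_iff_dvd]
  have := List.length_pos_of_mem h1
  omega

lemma pv_F_nonneg (n i : Int) : 0 ≤ pvF n i := by
  unfold pvF; positivity

lemma pv_bump_len (l : List Int) (j : Int) : (pvBump l j).length = l.length := by
  simp [pvBump]

lemma pv_bump_fold_len (js : List Int) : ∀ (l : List Int),
    (js.foldl (fun l2 x => pvBump l2 x) l).length = l.length := by
  induction js with
  | nil => intro l; rfl
  | cons x js ih => intro l; rw [List.foldl_cons, ih, pv_bump_len]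

lemma pv_bump_getD (l : List Int) (x : Int) (c : Nat) (hx : 1 ≤ x) (hlt : x.toNat < l.length) :
    (pvBump l x).getD c 0 = l.getD c 0 + (if x.toNat = c then 1 else 0) := by
  unfold pvBump
  rw [PySem.List.pyGetD_of_nonneg l 0 (by omega)]
  by_cases h : x.toNat = c
  · subst h
    simp [List.getD, List.getElem?_set, hlt]
  · simp [List.getD, List.getElem?_set, h]

lemma pv_bump_fold (js : List Int) : ∀ (l : List Int) (c : Nat),
    (∀ x ∈ js, 1 ≤ x ∧ x.toNat < l.length) →
    (js.foldl (fun l2 x => pvBump l2 x) l).getD c 0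
      = l.getD c 0 + (js.countP (fun x => x.toNat == c) : Int) := by
  induction js with
  | nil => intro l c _; simp
  | cons x js ih =>
    intro l c h
    have hx := h x (by simp)
    rw [List.foldl_cons, ih _ c (by
      intro y hy
      have := h y (by simp [hy])
      rw [pv_bump_len]
      exact this)]
    rw [pv_bump_getD l x c hx.1 hx.2, List.countP_cons]
    by_cases hc : x.toNat = c
    · simp [hc]; omega
    · have : (x.toNat == c) = false := by simp [hc]
      simp [this, hc]

lemma pv_sieve_len (n : Int) : (pvSieve n).length = (n + 1).toNat := by
  unfold pvSieve
  rw [← List.foldl_flatMap, pv_bump_fold_len, List.length_replicate]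

-- count of j in the multiples-of-i range
lemma pv_range_count (n i j : Int) (hi : 1 ≤ i) (hj1 : 1 ≤ j) (hj2 : j ≤ n) :
    (PySem.List.pyRange i (n + 1) i).count j = if i ∣ j then 1 else 0 := by
  have hmem : j ∈ PySem.List.pyRange i (n + 1) i ↔ i ∣ j := by
    rw [PySem.List.mem_pyRange_iff_of_pos (by omega)]
    constructor
    · rintro ⟨h1, h2, h3⟩
      have : i ∣ j - i + i := by exact dvd_add h3 dvd_rfl
      simpa using this
    · intro hd
      refine ⟨Int.le_of_dvd (by omega) hd, by omega, ?_⟩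
      exact dvd_sub hd dvd_rfl
  have hnd : (PySem.List.pyRange i (n + 1) i).Nodup := by
    rw [PySem.List.pyRange_of_pos i (n+1) (by omega)]
    refine List.Nodup.map ?_ (List.nodup_range)
    intro a b hab
    simp at hab
    omega
  by_cases hd : i ∣ j
  · rw [if_pos hd]
    exact List.count_eq_one_of_mem hnd (hmem.2 hd)
  · rw [if_neg hd]
    exact List.count_eq_zero_of_not_mem (fun hm => hd (hmem.1 hm))

lemma pv_gw_eq_countP (j : Int) (h : 1 ≤ j) :
    pvGw j = ((PySem.List.pyRange 1 (j + 1) 1).countP (fun i => decide (i ∣ j)) : Int) := by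
  unfold pvGw
  have hc : ∀ x ∈ PySem.List.pyRange 1 (j + 1) 1,
      (PySem.Int.mod j x == 0) = decide (x ∣ j) := by
    intro x _
    rw [Bool.eq_iff_iff]
    simp [PySem.Int.mod_eq_zero_iff_dvd]
  rw [List.filter_congr hc, List.countP_eq_length_filter]

lemma pv_sieve_getD (n j : Int) (h1 : 1 ≤ j) (h2 : j ≤ n) :
    (pvSieve n).getD j.toNat 0 = pvGw j := by
  unfold pvSieve
  rw [← List.foldl_flatMap]
  rw [pv_bump_fold _ _ _ (by
    intro x hx
    rcases List.mem_flatMap.1 hx with ⟨i, hi, hxi⟩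
    have hib := (PySem.List.mem_pyRange_one).1 hi
    have hxb := (PySem.List.mem_pyRange_iff_of_pos (show (0:Int) < i by omega) x).1 hxi
    constructor
    · omega
    · rw [List.length_replicate]; omega)]
  have hrep : (List.replicate (n + 1).toNat (0:Int)).getD j.toNat 0 = 0 := by
    simp [List.getD]
  rw [hrep]
  -- countP (toNat == j.toNat) = count j on a list of elements ≥ 1
  have hcnt : ((PySem.List.pyRange 1 (n + 1) 1).flatMap (fun i => PySem.List.pyRange i (n + 1) i)).countP
        (fun x => x.toNat == j.toNat)
      = ((PySem.List.pyRange 1 (n + 1) 1).flatMap (fun i => PySem.List.pyRange i (n + 1) i)).count j := by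
    rw [List.count_eq_countP]
    apply List.countP_congr
    intro x hx
    rcases List.mem_flatMap.1 hx with ⟨i, hi, hxi⟩
    have hib := (PySem.List.mem_pyRange_one).1 hi
    have hxb := (PySem.List.mem_pyRange_iff_of_pos (show (0:Int) < i by omega) x).1 hxi
    simp only [beq_iff_eq]
    omega
  rw [hcnt, List.count_flatMap]
  have hmap : ((PySem.List.pyRange 1 (n + 1) 1).map (List.count j ∘ fun i => PySem.List.pyRange i (n + 1) i))
      = (PySem.List.pyRange 1 (n + 1) 1).map (fun i => if decide (i ∣ j) = true then 1 else 0) := by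
    apply List.map_congr_left
    intro i hi
    have hib := (PySem.List.mem_pyRange_one).1 hi
    simp only [Function.comp, decide_eq_true_eq]
    exact pv_range_count n i j (by omega) h1 h2
  have hz : (PySem.List.pyRange (j+1) (n+1) 1).countP (fun i => decide (i ∣ j)) = 0 := by
    apply List.countP_eq_zero.2
    intro x hx
    have hxb := (PySem.List.mem_pyRange_one).1 hx
    simp only [decide_eq_true_eq]
    intro hd
    have := Int.le_of_dvd (by omega) hd
    omega
  rw [hmap, PySem.List.sum_map_ite_one_zero_nat (fun k => decide (k ∣ j)), pv_gw_eq_countP j h1,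
      PySem.List.pyRange_one_append 1 (j+1) (n+1) (by omega) (by omega), List.countP_append, hz]
  push_cast
  ring

lemma pv_dv_eq (n j : Int) (h1 : 1 ≤ j) (h2 : j ≤ n) :
    PySem.List.pyGetD (pvSieve n) j 0 = pvGw j := by
  rw [PySem.List.pyGetD_of_nonneg _ _ (by omega)]
  exact pv_sieve_getD n j h1 h2

lemma pv_fold_is_max : (fun (t v : Int) => if t < v then v else t) = max := by
  funext t v
  simp [max_def]
  split_ifs <;> omega

lemma pv_top_nonneg (n : Int) :
    0 ≤ (pvSieve n).foldl (fun t v => if t < v then v else t) 0 := by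
  rw [pv_fold_is_max]
  exact (PySem.List.le_foldl_max _ _).1

lemma pv_top_ge (n k : Int) (h1 : 1 ≤ k) (h2 : k ≤ n) :
    pvGw k ≤ (pvSieve n).foldl (fun t v => if t < v then v else t) 0 := by
  rw [pv_fold_is_max]
  have hlen : k.toNat < (pvSieve n).length := by rw [pv_sieve_len]; omega
  have hmem : pvGw k ∈ pvSieve n := by
    rw [← pv_sieve_getD n k h1 h2, List.getD_eq_getElem _ _ hlen]
    exact List.getElem_mem hlen
  exact (PySem.List.le_foldl_max _ _).2 _ hmem

lemma pv_drop_sum (cb : List Int) : ∀ (t : Nat),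
    (cb.drop t).sum = ∑ i ∈ Finset.range (cb.length - t), cb.getD (t + i) 0 := by
  induction cb with
  | nil => intro t; simp
  | cons v cb ih =>
    intro t
    cases t with
    | zero =>
      simp only [List.drop_zero, List.sum_cons, List.length_cons, Nat.sub_zero]
      rw [Finset.sum_range_succ']
      simp only [List.getD_cons_succ, List.getD_cons_zero, Nat.zero_add]
      have h0 := ih 0
      simp only [List.drop_zero, Nat.sub_zero, Nat.zero_add] at h0
      rw [h0]
      exact add_comm _ _
    | succ t =>
      simp only [List.drop_succ_cons, List.length_cons, Nat.succ_sub_succ]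
      rw [ih t]
      apply Finset.sum_congr rfl
      intro q _
      rw [show t + 1 + q = (t + q) + 1 by omega]
      simp

lemma pv_ind_sum (m : Nat) : ∀ (t c : Nat),
    (∑ i ∈ Finset.range m, (if c = t + i then (1 : Int) else 0))
      = if t ≤ c ∧ c < t + m then 1 else 0 := by
  induction m with
  | zero => intro t c; simp
  | succ m ih =>
    intro t c
    rw [Finset.sum_range_succ, ih t c]
    split_ifs <;> omega

lemma pv_count_sum (vals : List Int) : ∀ (t L : Nat), (∀ x ∈ vals, x.toNat < L) →
    (∑ i ∈ Finset.range (L - t), ((vals.countP (fun x => x.toNat == t + i)) : Int))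
      = (vals.countP (fun x => decide (t ≤ x.toNat)) : Int) := by
  induction vals with
  | nil => intro t L _; simp
  | cons x vals ih =>
    intro t L hL
    have hx : x.toNat < L := hL x (by simp)
    simp only [List.countP_cons]
    push_cast
    rw [Finset.sum_add_distrib, ih t L (fun y hy => hL y (by simp [hy]))]
    have hind : (∑ i ∈ Finset.range (L - t), (if (x.toNat == t + i) = true then (1:Int) else 0))
        = if t ≤ x.toNat then 1 else 0 := by
      simp only [beq_iff_eq]
      rw [pv_ind_sum (L - t) t x.toNat]
      split_ifs <;> omega
    rw [hind]
    have : ((decide (t ≤ x.toNat)) = true) = (t ≤ x.toNat) := by simp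
    split_ifs with h1 h2 h2 <;> simp_all <;> omega

lemma pv_prefix (n : Int) (p l : List Int) (i : Int)
    (hp : p ++ i :: l = PySem.List.pyRange 1 (n + 1) 1) :
    p = PySem.List.pyRange 1 i 1 ∧ 1 ≤ i ∧ i ≤ n := by
  have hlen : p.length + (l.length + 1) = ((n + 1) - 1).toNat := by
    have := congrArg List.length hp
    simpa [PySem.List.length_pyRange_one] using this
  have hplen : p.length < n.toNat := by omega
  have hsplit : PySem.List.pyRange 1 (n + 1) 1
      = PySem.List.pyRange 1 (1 + p.length) 1 ++ PySem.List.pyRange (1 + p.length) (n + 1) 1 :=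
    PySem.List.pyRange_one_append 1 (1 + p.length) (n + 1) (by omega) (by omega)
  have hlen2 : p.length = (PySem.List.pyRange 1 (1 + p.length) 1).length := by
    rw [PySem.List.length_pyRange_one]; omega
  have hinj := List.append_inj (hp.trans hsplit) hlen2
  have hcons : PySem.List.pyRange (1 + (p.length : Int)) (n + 1) 1
      = (1 + (p.length : Int)) :: PySem.List.pyRange (1 + p.length + 1) (n + 1) 1 :=
    PySem.List.pyRange_one_cons (by omega)
  have hi : i = 1 + (p.length : Int) := by
    have := hinj.2
    rw [hcons] at this
    exact (List.cons_eq_cons.1 this).1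
  exact ⟨by rw [hinj.1, hi], by omega, by omega⟩

lemma pv_C_len (n : Int) (p : List Int) :
    (pvC n p).length = ((pvSieve n).foldl (fun t v => if t < v then v else t) 0 + 2).toNat := by
  unfold pvC
  rw [← List.foldl_map (f := fun k => PySem.List.pyGetD (pvSieve n) k 0)
        (g := fun cb x => pvBump cb x),
      pv_bump_fold_len, List.length_replicate]



lemma pv_f_val (n i : Int) (hp : 1 ≤ i) (hi : i ≤ n) :
    (PySem.List.slice (pvC n (PySem.List.pyRange 1 i 1))
        (some (PySem.List.pyGetD (pvSieve n) i 0 + 1)) none).sum = pvF n i := by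
  have htopnn : 0 ≤ (pvSieve n).foldl (fun t v => if t < v then v else t) 0 := pv_top_nonneg n
  set L : Nat := ((pvSieve n).foldl (fun t v => if t < v then v else t) 0 + 2).toNat with hL
  set p := PySem.List.pyRange 1 i 1 with hpdef
  have hmemp : ∀ k ∈ p, 1 ≤ k ∧ k < i := by
    intro k hk
    have := (PySem.List.mem_pyRange_one).1 hk
    omega
  have hdvk : ∀ k ∈ p, pvDv n k = pvGw k := by
    intro k hk
    have := hmemp k hk
    exact pv_dv_eq n k (by omega) (by omega)
  have hvals : ∀ x ∈ p.map (pvDv n), 1 ≤ x ∧ x.toNat < L := by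
    intro x hx
    rcases List.mem_map.1 hx with ⟨k, hk, rfl⟩
    have hb := hmemp k hk
    rw [hdvk k hk]
    have h1 := pv_gw_pos k (by omega)
    have h2 := pv_top_ge n k (by omega) (by omega)
    refine ⟨h1, by omega⟩
  have hdi : pvDv n i = pvGw i := pv_dv_eq n i hp hi
  have hdipos : 1 ≤ pvDv n i := by rw [hdi]; exact pv_gw_pos i hp
  show (PySem.List.slice (pvC n p) (some (pvDv n i + 1)) none).sum = pvF n i
  rw [PySem.List.slice_from _ (by omega : (0:Int) ≤ pvDv n i + 1)]
  have hCfold : pvC n p = (p.map (pvDv n)).foldl (fun cb x => pvBump cb x) (List.replicate L 0) := by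
    unfold pvC
    rw [← List.foldl_map (f := fun k => PySem.List.pyGetD (pvSieve n) k 0)
          (g := fun cb x => pvBump cb x)]
    rfl
  have hClen : (pvC n p).length = L := pv_C_len n p
  have hgetD : ∀ c : Nat, (pvC n p).getD c 0 = ((p.map (pvDv n)).countP (fun x => x.toNat == c) : Int) := by
    intro c
    rw [hCfold, pv_bump_fold _ _ _ (by
      intro x hx
      rw [List.length_replicate]
      exact hvals x hx)]
    simp [List.getD]
  rw [pv_drop_sum, hClen]
  calc (∑ q ∈ Finset.range (L - (pvDv n i + 1).toNat), (pvC n p).getD ((pvDv n i + 1).toNat + q) 0)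
      = ∑ q ∈ Finset.range (L - (pvDv n i + 1).toNat),
          ((p.map (pvDv n)).countP (fun x => x.toNat == (pvDv n i + 1).toNat + q) : Int) :=
        Finset.sum_congr rfl (fun q _ => hgetD ((pvDv n i + 1).toNat + q))
    _ = ((p.map (pvDv n)).countP (fun x => decide ((pvDv n i + 1).toNat ≤ x.toNat)) : Int) :=
        pv_count_sum (p.map (pvDv n)) ((pvDv n i + 1).toNat) L (fun x hx => (hvals x hx).2)
    _ = ((p.map (pvDv n)).countP (fun x => decide (pvDv n i < x)) : Int) := by
        congr 1
        apply List.countP_congr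
        intro x hx
        have h1 := (hvals x hx).1
        simp only [decide_eq_true_eq]
        omega
    _ = (p.countP (fun k => decide (pvGw i < pvGw k)) : Int) := by
        rw [List.countP_map]
        congr 1
        apply List.countP_congr
        intro k hk
        simp only [Function.comp]
        rw [hdvk k hk, hdi]
    _ = pvF n i := by
        unfold pvF
        rw [PySem.List.pyRange_one_append 1 i (n + 1) (by omega) (by omega), List.countP_append]
        have hz : (PySem.List.pyRange i (n + 1) 1).countP
            (fun k => decide (k < i ∧ pvGw i < pvGw k)) = 0 := by
          apply List.countP_eq_zero.2
          intro x hx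
          have := (PySem.List.mem_pyRange_one).1 hx
          simp only [decide_eq_true_eq]
          omega
        rw [hz]
        rw [List.countP_congr (by
          intro k hk
          have := hmemp k hk
          simp only [decide_eq_true_eq]
          omega : ∀ k ∈ p, decide (pvGw i < pvGw k) = true ↔ decide (k < i ∧ pvGw i < pvGw k) = true)]
        rw [← hpdef]
        omega

lemma pv_loopB_inv (n : Int) : ∀ (l p : List Int),
    p ++ l = PySem.List.pyRange 1 (n + 1) 1 →
    l.foldl (pvStepB (pvSieve n)) (pvC n p, (p.map (pvF n)).foldl pvMcStep (-1, 0))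
      = (pvC n (p ++ l), ((p ++ l).map (pvF n)).foldl pvMcStep (-1, 0)) := by
  intro l
  induction l with
  | nil => intro p _; simp
  | cons i l ih =>
    intro p hp
    obtain ⟨hpre, hi1, hi2⟩ := pv_prefix n p l i hp
    rw [List.foldl_cons]
    have hstep : pvStepB (pvSieve n) (pvC n p, (p.map (pvF n)).foldl pvMcStep (-1, 0)) i
        = (pvC n (p ++ [i]), ((p ++ [i]).map (pvF n)).foldl pvMcStep (-1, 0)) := by
      unfold pvStepB
      have hf : (PySem.List.slice (pvC n p) (some (PySem.List.pyGetD (pvSieve n) i 0 + 1)) none).sum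
          = pvF n i := by
        rw [hpre]
        exact pv_f_val n i hi1 hi2
      have h1 : pvBump (pvC n p) (PySem.List.pyGetD (pvSieve n) i 0) = pvC n (p ++ [i]) := by
        unfold pvC
        rw [List.foldl_append]
        rfl
      have h2 : pvMcStep ((p.map (pvF n)).foldl pvMcStep (-1, 0)) (pvF n i)
          = ((p ++ [i]).map (pvF n)).foldl pvMcStep (-1, 0) := by
        rw [List.map_append, List.foldl_append]
        rfl
      simp only [hf, Prod.mk.injEq]
      exact ⟨h1, h2⟩
    rw [hstep, ih (p ++ [i]) (by simpa using hp)]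
    simp

-- ===== VERDICT (by name: the statement is the Claim_ definition above) =====
theorem solution_spec : Claim_equal_solution := by
  unfold Claim_equal_solution Spec_solution
  intro n _
  by_cases hn : n ≤ 0
  · simp only [solution, solution_alt, if_pos hn]
    rw [PySem.List.pyRange_neg_one_eq_nil (by omega : n ≤ (0:Int))]
    rfl
  · have hn1 : 1 ≤ n := by omega
    have hdesc : PySem.List.pyRange n 0 (-1) = (PySem.List.pyRange 1 (n + 1) 1).reverse := by
      have := PySem.List.pyRange_neg_one_eq_reverse n 0
      simpa using this
    -- A side
    have hpw : (PySem.List.pyRange n 0 (-1)).Pairwise (· > ·) := by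
      rw [hdesc, List.pairwise_reverse]
      exact PySem.List.pairwise_lt_pyRange_one 1 (n + 1)
    have hmem : ∀ i ∈ PySem.List.pyRange n 0 (-1), i ∈ PySem.List.pyRange 1 (n + 1) 1 := by
      intro i hi
      rw [hdesc, List.mem_reverse] at hi
      exact hi
    have hA : solution n
        = [(((PySem.List.pyRange 1 (n + 1) 1).map (pvF n)).reverse.foldl pvMcStep (0, 0)).1,
           (((PySem.List.pyRange 1 (n + 1) 1).map (pvF n)).reverse.foldl pvMcStep (0, 0)).2] := by
      simp only [solution]
      rw [pv_loopA_eq n _ 0 0 hpw hmem, ← List.foldl_map, hdesc, List.map_reverse]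
    -- B side
    have hB := pv_loopB_inv n (PySem.List.pyRange 1 (n + 1) 1) [] (by simp)
    simp only [List.nil_append, List.map_nil, List.foldl_nil, pvC] at hB
    have hBs : solution_alt n
        = [(((PySem.List.pyRange 1 (n + 1) 1).map (pvF n)).foldl pvMcStep (-1, 0)).1,
           (((PySem.List.pyRange 1 (n + 1) 1).map (pvF n)).foldl pvMcStep (-1, 0)).2] := by
      simp only [solution_alt, if_neg hn]
      rw [hB]
    rw [hA, hBs]
    -- common analysis
    obtain ⟨x, t, hcons, hx⟩ : ∃ x t, (PySem.List.pyRange 1 (n + 1) 1).map (pvF n) = x :: t ∧ x = pvF n 1 := by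
      rw [PySem.List.pyRange_one_cons (by omega : (1:Int) < n + 1)]
      exact ⟨pvF n 1, _, rfl, rfl⟩
    rw [hcons]
    rw [pv_mc_eq, pv_mc_eq]
    simp only [pv_foldl_max_reverse, List.count_reverse]
    have hx0 : (0:Int) ≤ x := hx ▸ pv_F_nonneg n 1
    have h1 : List.foldl max 0 (x :: t) = List.foldl max x t := by
      simp only [List.foldl_cons]
      rw [max_eq_right hx0]
    have h2 : List.foldl max (-1) (x :: t) = List.foldl max x t := by
      simp only [List.foldl_cons]
      rw [max_eq_right (by omega : (-1:Int) ≤ x)]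
    rw [h1, h2]
    have hxM : x ≤ List.foldl max x t := (PySem.List.le_foldl_max t x).1
    by_cases hM : List.foldl max x t = 0
    · rw [hM]
      norm_num
    · rw [if_neg hM, if_neg (by omega : ¬ List.foldl max x t = -1)]
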